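-- pv_equiv track=rewrite | github.com/tupkalenkodi/DONE | Final_7_February_2020/countries_DONE.py | lets_talk
-- ===== SOURCE A (Python) =====
-- def to_languages(countries):
--     new_dict = {}
--     keys = list(countries.keys())
--     values = list(countries.values())
--
--     for i in values:
--         for j in i:
--             if j not in new_dict:
--                 new_dict[j] = []
--
--     for k in keys:
--         for m in list(new_dict.keys()):
--             if m in countries[k]:
--                 new_dict[m].append(k)
--
--     return new_dict
--
-- def lets_talk(countries):
--     new_dict = {}
--     res_dict = {}
--
--     for i in list(countries.keys()):
--         new_dict[i] = []
--     for j in list(to_languages(countries).values()):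
--         for k in j:
--             new_dict[k] += j
--
--     keys = list(new_dict.keys())
--     for n in keys:
--         l_countries = list(set(new_dict[n]))
--         l_countries.remove(n)
--         if l_countries:
--             res_dict[n] = sorted(l_countries)
--
--     return res_dict
-- ===== SOURCE B (Python) =====
-- def lets_talk(countries):
--     # One pass builds a language -> set-of-countries index; each country's
--     # partners are the union of its languages' sets, minus itself.
--     by_lang = {}
--     for country, langs in countries.items():
--         for lang in langs:
--             by_lang.setdefault(lang, set()).add(country)
--     res = {}
--     for country, langs in countries.items():
--         partners = set()
--         for lang in langs:
--             partners |= by_lang[lang]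
--         partners.discard(country)
--         if partners:
--             res[country] = sorted(partners)
--     return res
-- ===== Notes on version B (the rewrite author's own statement) =====
-- stated objective: faster
-- what changed: B builds a language-to-countries index in one pass and takes per-country set unions of the index entries, instead of A's rebuilding of every language group by scanning all countries per language and then concatenating whole groups repeatedly before deduplicating.
-- crash fix: On inputs where some country's language list is empty (after dict key merging) A raises ValueError from l_countries.remove(n); B returns the result that simply omits or pairs that country normally. — e.g. on lets_talk([("aa", []), ("bb", ["en"])]): A raises ValueError, B returns []
import Mathlib
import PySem

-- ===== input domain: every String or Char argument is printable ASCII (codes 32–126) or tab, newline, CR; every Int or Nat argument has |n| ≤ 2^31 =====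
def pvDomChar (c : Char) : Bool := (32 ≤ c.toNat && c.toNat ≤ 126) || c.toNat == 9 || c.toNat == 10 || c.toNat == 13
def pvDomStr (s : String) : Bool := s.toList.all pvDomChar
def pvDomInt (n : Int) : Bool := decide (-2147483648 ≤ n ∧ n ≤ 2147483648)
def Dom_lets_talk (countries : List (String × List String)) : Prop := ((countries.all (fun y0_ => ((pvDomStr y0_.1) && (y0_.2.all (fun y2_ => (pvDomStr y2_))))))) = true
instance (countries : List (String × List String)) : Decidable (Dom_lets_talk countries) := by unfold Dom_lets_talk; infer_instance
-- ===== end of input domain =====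

-- B replaces A's repeated group re-scanning and duplicated group concatenation by a single
-- language→countries index and per-country set unions (objective: faster).

-- ===== PORT A =====
def to_languages (countries : List (String × List String)) : PySem.Dict String (List String) :=
  let cdict := PySem.Dict.ofList countries
  let keys := cdict.keys
  let values := cdict.values
  let new_dict : PySem.Dict String (List String) :=
    values.foldl (fun d i =>
      i.foldl (fun d j => if d.contains j then d else d.insert j []) d) PySem.Dict.empty
  keys.foldl (fun d k =>
    d.keys.foldl (fun d m =>
      if (cdict.getD k []).contains m then d.modify m [] (fun v => v ++ [k]) else d) d) new_dict

def lets_talk (countries : List (String × List String)) : List (String × List String) :=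
  let cdict := PySem.Dict.ofList countries
  let new_dict0 : PySem.Dict String (List String) :=
    cdict.keys.foldl (fun d i => d.insert i []) PySem.Dict.empty
  let new_dict :=
    (to_languages countries).values.foldl (fun d j =>
      j.foldl (fun d k => d.modify k [] (fun v => v ++ j)) d) new_dict0
  let res_dict :=
    new_dict.keys.foldl (fun res n =>
      match PySem.List.remove? (PySem.Set.ofList (new_dict.getD n [])) n with
      | none => res   -- here Python raises ValueError; such inputs are excluded by Pre_
      | some l => if l ≠ [] then res.insert n (PySem.List.sorted l (fun x => x)) else res)
      PySem.Dict.empty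
  res_dict.items

-- ===== PORT B =====
def lets_talk_alt (countries : List (String × List String)) : List (String × List String) :=
  let cdict := PySem.Dict.ofList countries
  let by_lang : PySem.Dict String (PySem.Set String) :=
    cdict.items.foldl (fun d p =>
      p.2.foldl (fun d lang => d.modify lang PySem.Set.empty (fun s => s.add p.1)) d)
      PySem.Dict.empty
  let res :=
    cdict.items.foldl (fun res p =>
      let partners : PySem.Set String := p.2.foldl (fun s lang => s.union (by_lang.getD lang PySem.Set.empty)) PySem.Set.empty
      let partners2 : PySem.Set String := partners.discard p.1
      if partners2 ≠ [] then res.insert p.1 (PySem.List.sorted partners2 (fun x => x)) else res)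
      (PySem.Dict.empty : PySem.Dict String (List String))
  res.items

-- ===== PRECONDITION & SPEC =====
-- Pre_ excludes exactly the inputs on which A raises ValueError: a country whose (dict-merged)
-- language list is empty never joins a language group, so A's `l_countries.remove(n)` fails.
def Pre_lets_talk (countries : List (String × List String)) : Prop :=
  ∀ p ∈ (PySem.Dict.ofList countries).items, p.2 ≠ []
instance (countries : List (String × List String)) : Decidable (Pre_lets_talk countries) := by
  unfold Pre_lets_talk; infer_instance
def pvWitness_lets_talk : (List (String × List String)) :=
  [("aa", ["en", "fr"]), ("bb", ["fr"]), ("cc", ["de"])]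
-- A raises ValueError exactly when some country's (dict-merged) language list is empty; B simply
-- leaves such a country without partners and returns normally.
def Raises_lets_talk (countries : List (String × List String)) : Prop :=
  ∃ p ∈ (PySem.Dict.ofList countries).items, p.2 = []
instance (countries : List (String × List String)) : Decidable (Raises_lets_talk countries) := by
  unfold Raises_lets_talk; infer_instance
def pvRaiseWitness_lets_talk : (List (String × List String)) := [("aa", []), ("bb", ["en"])]
def pvRaiseWitnessOut_lets_talk : List (String × List String) := []
def Spec_lets_talk (countries : List (String × List String)) (out : List (String × List String)) : Prop := out = lets_talk_alt countries
instance (countries : List (String × List String)) (out : List (String × List String)) : Decidable (Spec_lets_talk countries out) := by unfold Spec_lets_talk; infer_instance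

-- ===== CLAIM (what is proved, stated in full; the proofs are below) =====
def Claim_equal_lets_talk : Prop := ∀ (countries : List (String × List String)), Dom_lets_talk countries → Pre_lets_talk countries → Spec_lets_talk countries (lets_talk countries)
def Claim_raises_lets_talk : Prop := (∀ (countries : List (String × List String)), Dom_lets_talk countries → Raises_lets_talk countries → ¬ Pre_lets_talk countries) ∧ (Dom_lets_talk (pvRaiseWitness_lets_talk) ∧ Raises_lets_talk (pvRaiseWitness_lets_talk) ∧ lets_talk_alt (pvRaiseWitness_lets_talk) = pvRaiseWitnessOut_lets_talk)

-- ===== LEMMAS AND PROOFS =====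

-- ---- phase 1 of to_languages: a dict whose every stored value is [] ----
lemma phase1_inner_getD (i : List String) (d : PySem.Dict String (List String))
    (h : ∀ m, d.getD m [] = ([] : List String)) (m : String) :
    ((i.foldl (fun d j => if d.contains j then d else d.insert j []) d).getD m []) = [] := by
  induction i generalizing d with
  | nil => exact h m
  | cons j rest ih =>
    simp only [List.foldl_cons]
    by_cases hc : d.contains j = true
    · rw [if_pos hc]; exact ih d h
    · rw [if_neg hc]
      refine ih _ ?_
      intro m'
      rw [PySem.Dict.getD_insert]
      split_ifs with h'
      · rfl
      · exact h m'

lemma phase1_getD (vals : List (List String)) (d : PySem.Dict String (List String))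
    (h : ∀ m, d.getD m [] = ([] : List String)) (m : String) :
    ((vals.foldl (fun d i =>
      i.foldl (fun d j => if d.contains j then d else d.insert j []) d) d).getD m []) = [] := by
  induction vals generalizing d with
  | nil => exact h m
  | cons i rest ih =>
    simp only [List.foldl_cons]
    exact ih _ (fun m' => phase1_inner_getD i d h m')

lemma phase1_inner_mem_keys (i : List String) (d : PySem.Dict String (List String)) (m : String) :
    m ∈ (i.foldl (fun d j => if d.contains j then d else d.insert j []) d).keys ↔
      m ∈ d.keys ∨ m ∈ i := by
  induction i generalizing d with
  | nil => simp
  | cons j rest ih =>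
    simp only [List.foldl_cons]
    by_cases hc : d.contains j = true
    · rw [if_pos hc, ih]
      have hj : j ∈ d.keys := (PySem.Dict.contains_iff_mem_keys d j).mp hc
      simp only [List.mem_cons]
      constructor
      · rintro (h | h)
        · exact Or.inl h
        · exact Or.inr (Or.inr h)
      · rintro (h | h | h)
        · exact Or.inl h
        · exact Or.inl (h ▸ hj)
        · exact Or.inr h
    · rw [if_neg hc, ih]
      simp only [PySem.Dict.mem_keys_insert, List.mem_cons]
      tauto

lemma phase1_mem_keys (vals : List (List String)) (d : PySem.Dict String (List String)) (m : String) :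
    m ∈ (vals.foldl (fun d i =>
      i.foldl (fun d j => if d.contains j then d else d.insert j []) d) d).keys ↔
      m ∈ d.keys ∨ ∃ i ∈ vals, m ∈ i := by
  induction vals generalizing d with
  | nil => simp
  | cons i rest ih =>
    simp only [List.foldl_cons]
    rw [ih, phase1_inner_mem_keys]
    simp only [List.mem_cons]
    constructor
    · rintro ((h | h) | ⟨i', hi', hm⟩)
      · exact Or.inl h
      · exact Or.inr ⟨i, Or.inl rfl, h⟩
      · exact Or.inr ⟨i', Or.inr hi', hm⟩
    · rintro (h | ⟨i', hi' | hi', hm⟩)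
      · exact Or.inl (Or.inl h)
      · exact Or.inl (Or.inr (hi' ▸ hm))
      · exact Or.inr ⟨i', hi', hm⟩

lemma phase1_inner_nodup_keys (i : List String) (d : PySem.Dict String (List String))
    (h : d.keys.Nodup) :
    (i.foldl (fun d j => if d.contains j then d else d.insert j []) d).keys.Nodup := by
  induction i generalizing d with
  | nil => exact h
  | cons j rest ih =>
    simp only [List.foldl_cons]
    by_cases hc : d.contains j = true
    · rw [if_pos hc]; exact ih d h
    · rw [if_neg hc]; exact ih _ (PySem.Dict.nodup_keys_insert d j [] h)

lemma phase1_nodup_keys (vals : List (List String)) (d : PySem.Dict String (List String))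
    (h : d.keys.Nodup) :
    (vals.foldl (fun d i =>
      i.foldl (fun d j => if d.contains j then d else d.insert j []) d) d).keys.Nodup := by
  induction vals generalizing d with
  | nil => exact h
  | cons i rest ih =>
    simp only [List.foldl_cons]
    exact ih _ (phase1_inner_nodup_keys i d h)

-- ---- phase 2 of to_languages: appending each country to the groups of its languages ----
lemma innerA (t : String → Bool) (k : String) (ms : List String)
    (d : PySem.Dict String (List String)) (hms : ms.Nodup) (hsub : ∀ m ∈ ms, m ∈ d.keys) :
    ((ms.foldl (fun d m => if t m then d.modify m [] (fun v => v ++ [k]) else d) d).keys = d.keys)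
    ∧ ∀ m, ((ms.foldl (fun d m => if t m then d.modify m [] (fun v => v ++ [k]) else d) d).getD m [])
      = if m ∈ ms ∧ t m then d.getD m [] ++ [k] else d.getD m [] := by
  induction ms generalizing d with
  | nil => exact ⟨rfl, fun m => by simp⟩
  | cons m' rest ih =>
    simp only [List.foldl_cons]
    have hm' : m' ∈ d.keys := hsub m' List.mem_cons_self
    have hc : d.contains m' = true := (PySem.Dict.contains_iff_mem_keys d m').mpr hm'
    obtain ⟨hnotin, hrest⟩ := List.nodup_cons.mp hms
    have hkeys : (if t m' then d.modify m' [] (fun v => v ++ [k]) else d).keys = d.keys := by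
      by_cases ht : t m'
      · rw [if_pos ht, PySem.Dict.keys_modify]
        exact PySem.Dict.keys_insert_of_contains d _ hc
      · rw [if_neg ht]
    have hget : ∀ m, (if t m' then d.modify m' [] (fun v => v ++ [k]) else d).getD m []
        = if m = m' ∧ t m' then d.getD m [] ++ [k] else d.getD m [] := by
      intro m
      by_cases ht : t m'
      · rw [if_pos ht, PySem.Dict.getD_modify]
        by_cases hmm : m = m' <;> simp [hmm, ht]
      · rw [if_neg ht]
        simp [ht]
    obtain ⟨ihk, ihg⟩ := ih (if t m' then d.modify m' [] (fun v => v ++ [k]) else d) hrest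
      (fun m hm => hkeys ▸ hsub m (List.mem_cons_of_mem _ hm))
    refine ⟨ihk.trans hkeys, ?_⟩
    intro m
    rw [ihg m, hget m]
    by_cases h1 : m ∈ rest <;> by_cases h2 : t m <;> by_cases h3 : m = m' <;>
      simp_all [List.mem_cons]

lemma outerA (t : String → String → Bool) (ks : List String)
    (d : PySem.Dict String (List String)) (hnd : d.keys.Nodup) :
    ((ks.foldl (fun d k =>
        d.keys.foldl (fun d m => if t k m then d.modify m [] (fun v => v ++ [k]) else d) d) d).keys
      = d.keys)
    ∧ ∀ m, ((ks.foldl (fun d k =>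
        d.keys.foldl (fun d m => if t k m then d.modify m [] (fun v => v ++ [k]) else d) d) d).getD m [])
      = if m ∈ d.keys then d.getD m [] ++ ks.filter (fun k => t k m) else d.getD m [] := by
  induction ks generalizing d with
  | nil => exact ⟨rfl, fun m => by simp⟩
  | cons k rest ih =>
    simp only [List.foldl_cons]
    obtain ⟨hk1, hg1⟩ := innerA (t k) k d.keys d hnd (fun m hm => hm)
    obtain ⟨ihk, ihg⟩ := ih
      (d.keys.foldl (fun d m => if t k m then d.modify m [] (fun v => v ++ [k]) else d) d)
      (by rw [hk1]; exact hnd)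
    refine ⟨ihk.trans hk1, ?_⟩
    intro m
    rw [ihg m, hk1, hg1 m, List.filter_cons]
    by_cases h1 : m ∈ d.keys <;> by_cases h2 : t k m <;> simp [h1, h2]

-- ---- to_languages characterised ----
lemma to_languages_mem_keys (countries : List (String × List String)) (m : String) :
    m ∈ (to_languages countries).keys ↔
      ∃ i ∈ (PySem.Dict.ofList countries).values, m ∈ i := by
  simp only [to_languages]
  rw [(outerA _ _ _ (phase1_nodup_keys _ _ (by simp [PySem.Dict.keys_empty]))).1,
    phase1_mem_keys]
  simp [PySem.Dict.keys_empty]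

lemma to_languages_nodup_keys (countries : List (String × List String)) :
    (to_languages countries).keys.Nodup := by
  simp only [to_languages]
  rw [(outerA _ _ _ (phase1_nodup_keys _ _ (by simp [PySem.Dict.keys_empty]))).1]
  exact phase1_nodup_keys _ _ (by simp [PySem.Dict.keys_empty])

lemma to_languages_getD (countries : List (String × List String)) (m : String)
    (hm : m ∈ (to_languages countries).keys) :
    (to_languages countries).getD m [] =
      (PySem.Dict.ofList countries).keys.filter
        (fun k => ((PySem.Dict.ofList countries).getD k []).contains m) := by
  have hnd1 : ((PySem.Dict.ofList countries).values.foldl (fun d i =>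
      i.foldl (fun d j => if d.contains j then d else d.insert j []) d)
      PySem.Dict.empty).keys.Nodup :=
    phase1_nodup_keys _ _ (by simp [PySem.Dict.keys_empty])
  simp only [to_languages] at hm ⊢
  rw [(outerA _ _ _ hnd1).2 m]
  rw [(outerA _ _ _ hnd1).1] at hm
  rw [if_pos hm, phase1_getD _ _ (fun m' => PySem.Dict.getD_empty m' []), List.nil_append]

-- ---- the accumulation loop of lets_talk ----
lemma lt_init_keys (ks : List String) (d : PySem.Dict String (List String)) :
    (ks.foldl (fun d i => d.insert i []) d).keys = PySem.Set.update d.keys ks :=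
  PySem.Dict.keys_foldl_insert ks (fun _ _ => []) d

lemma lt_init_getD (ks : List String) (d : PySem.Dict String (List String))
    (h : ∀ m, d.getD m [] = ([] : List String)) (m : String) :
    ((ks.foldl (fun d i => d.insert i []) d).getD m []) = [] := by
  induction ks generalizing d with
  | nil => exact h m
  | cons i rest ih =>
    simp only [List.foldl_cons]
    refine ih _ ?_
    intro m'
    rw [PySem.Dict.getD_insert]
    split_ifs with h'
    · rfl
    · exact h m'

lemma innerB (j : List String) (ks : List String) (d : PySem.Dict String (List String))
    (hks : ks.Nodup) (hsub : ∀ k ∈ ks, k ∈ d.keys) :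
    ((ks.foldl (fun d k => d.modify k [] (fun v => v ++ j)) d).keys = d.keys)
    ∧ ∀ n, ((ks.foldl (fun d k => d.modify k [] (fun v => v ++ j)) d).getD n [])
      = if n ∈ ks then d.getD n [] ++ j else d.getD n [] := by
  induction ks generalizing d with
  | nil => exact ⟨rfl, fun n => by simp⟩
  | cons k rest ih =>
    simp only [List.foldl_cons]
    have hk : k ∈ d.keys := hsub k List.mem_cons_self
    have hc : d.contains k = true := (PySem.Dict.contains_iff_mem_keys d k).mpr hk
    obtain ⟨hnotin, hrest⟩ := List.nodup_cons.mp hks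
    have hkeys : (d.modify k [] (fun v => v ++ j)).keys = d.keys := by
      rw [PySem.Dict.keys_modify]
      exact PySem.Dict.keys_insert_of_contains d _ hc
    obtain ⟨ihk, ihg⟩ := ih (d.modify k [] (fun v => v ++ j)) hrest
      (fun x hx => hkeys ▸ hsub x (List.mem_cons_of_mem _ hx))
    refine ⟨ihk.trans hkeys, ?_⟩
    intro n
    rw [ihg n, PySem.Dict.getD_modify]
    by_cases h1 : n ∈ rest <;> by_cases h3 : n = k <;> simp_all [List.mem_cons]

lemma outerB (gs : List (List String)) (d : PySem.Dict String (List String))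
    (hgs : ∀ j ∈ gs, j.Nodup ∧ ∀ k ∈ j, k ∈ d.keys) :
    ((gs.foldl (fun d j => j.foldl (fun d k => d.modify k [] (fun v => v ++ j)) d) d).keys = d.keys)
    ∧ ∀ n c, (c ∈ (gs.foldl (fun d j => j.foldl (fun d k => d.modify k [] (fun v => v ++ j)) d) d).getD n []
      ↔ c ∈ d.getD n [] ∨ ∃ j ∈ gs, n ∈ j ∧ c ∈ j) := by
  induction gs generalizing d with
  | nil => exact ⟨rfl, fun n c => by simp⟩
  | cons j rest ih =>
    simp only [List.foldl_cons]
    obtain ⟨hj, hjsub⟩ := hgs j List.mem_cons_self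
    obtain ⟨hk1, hg1⟩ := innerB j j d hj hjsub
    obtain ⟨ihk, ihg⟩ := ih (j.foldl (fun d k => d.modify k [] (fun v => v ++ j)) d)
      (fun j' hj' => ⟨(hgs j' (List.mem_cons_of_mem _ hj')).1,
        fun k hk => hk1 ▸ (hgs j' (List.mem_cons_of_mem _ hj')).2 k hk⟩)
    refine ⟨ihk.trans hk1, ?_⟩
    intro n c
    rw [ihg n c, hg1 n]
    by_cases hn : n ∈ j <;> simp only [hn, if_pos, List.mem_append, List.mem_cons] <;>
      constructor
    · rintro ((h | h) | ⟨j', hj', hnj', hcj'⟩)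
      · exact Or.inl h
      · exact Or.inr ⟨j, Or.inl rfl, hn, h⟩
      · exact Or.inr ⟨j', Or.inr hj', hnj', hcj'⟩
    · rintro (h | ⟨j', hj' | hj', hnj', hcj'⟩)
      · exact Or.inl (Or.inl h)
      · exact Or.inl (Or.inr (hj' ▸ hcj'))
      · exact Or.inr ⟨j', hj', hnj', hcj'⟩
    · rintro (h | ⟨j', hj', hnj', hcj'⟩)
      · exact Or.inl h
      · exact Or.inr ⟨j', Or.inr hj', hnj', hcj'⟩
    · rintro (h | ⟨j', hj' | hj', hnj', hcj'⟩)
      · exact Or.inl h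
      · exact absurd (hj' ▸ hnj') hn
      · exact Or.inr ⟨j', hj', hnj', hcj'⟩

-- ---- B's language index ----
lemma byLang_inner_getD (ls : List String) (c : String) (d : PySem.Dict String (PySem.Set String))
    (m x : String) :
    (x ∈ (ls.foldl (fun d lang => d.modify lang PySem.Set.empty (fun s => s.add c)) d).getD m PySem.Set.empty
      ↔ x ∈ d.getD m PySem.Set.empty ∨ (m ∈ ls ∧ x = c)) := by
  induction ls generalizing d with
  | nil => simp
  | cons lang rest ih =>
    simp only [List.foldl_cons]
    rw [ih, PySem.Dict.getD_modify]
    by_cases hm : m = lang <;>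
      simp [hm, PySem.Set.mem_add, List.mem_cons] <;> tauto

lemma byLang_getD_mem (l : List (String × List String)) (d : PySem.Dict String (PySem.Set String))
    (m x : String) :
    (x ∈ (l.foldl (fun d p =>
        p.2.foldl (fun d lang => d.modify lang PySem.Set.empty (fun s => s.add p.1)) d) d).getD m PySem.Set.empty
      ↔ x ∈ d.getD m PySem.Set.empty ∨ ∃ p ∈ l, m ∈ p.2 ∧ x = p.1) := by
  induction l generalizing d with
  | nil => simp
  | cons p rest ih =>
    simp only [List.foldl_cons]
    rw [ih, byLang_inner_getD]
    simp only [List.mem_cons]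
    constructor
    · rintro ((h | h) | ⟨p', hp', hm, hx⟩)
      · exact Or.inl h
      · exact Or.inr ⟨p, Or.inl rfl, h.1, h.2⟩
      · exact Or.inr ⟨p', Or.inr hp', hm, hx⟩
    · rintro (h | ⟨p', hp' | hp', hm, hx⟩)
      · exact Or.inl (Or.inl h)
      · exact Or.inl (Or.inr (hp' ▸ ⟨hm, hx⟩))
      · exact Or.inr ⟨p', hp', hm, hx⟩

lemma byLang_inner_nodup (ls : List String) (c : String) (d : PySem.Dict String (PySem.Set String))
    (h : ∀ m, (d.getD m PySem.Set.empty).Nodup) (m : String) :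
    ((ls.foldl (fun d lang => d.modify lang PySem.Set.empty (fun s => s.add c)) d).getD m PySem.Set.empty).Nodup := by
  induction ls generalizing d with
  | nil => exact h m
  | cons lang rest ih =>
    simp only [List.foldl_cons]
    refine ih _ ?_
    intro m'
    rw [PySem.Dict.getD_modify]
    split_ifs with h'
    · exact PySem.Set.nodup_add _ _ (h lang)
    · exact h m'

lemma byLang_getD_nodup (l : List (String × List String)) (d : PySem.Dict String (PySem.Set String))
    (h : ∀ m, (d.getD m PySem.Set.empty).Nodup) (m : String) :
    ((l.foldl (fun d p =>
        p.2.foldl (fun d lang => d.modify lang PySem.Set.empty (fun s => s.add p.1)) d) d).getD m PySem.Set.empty).Nodup := by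
  induction l generalizing d with
  | nil => exact h m
  | cons p rest ih =>
    simp only [List.foldl_cons]
    exact ih _ (fun m' => byLang_inner_nodup p.2 p.1 d h m')

-- ---- B's per-country union ----
lemma partners_mem (bl : PySem.Dict String (PySem.Set String)) (ls : List String)
    (s : PySem.Set String) (c : String) :
    (c ∈ ls.foldl (fun s lang => s.union (bl.getD lang PySem.Set.empty)) s
      ↔ c ∈ s ∨ ∃ lang ∈ ls, c ∈ bl.getD lang PySem.Set.empty) := by
  induction ls generalizing s with
  | nil => simp
  | cons lang rest ih =>
    simp only [List.foldl_cons]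
    rw [ih, PySem.Set.mem_union]
    simp only [List.mem_cons]
    constructor
    · rintro ((h | h) | ⟨l', hl', hc⟩)
      · exact Or.inl h
      · exact Or.inr ⟨lang, Or.inl rfl, h⟩
      · exact Or.inr ⟨l', Or.inr hl', hc⟩
    · rintro (h | ⟨l', hl' | hl', hc⟩)
      · exact Or.inl (Or.inl h)
      · exact Or.inl (Or.inr (hl' ▸ hc))
      · exact Or.inr ⟨l', hl', hc⟩

lemma partners_nodup (bl : PySem.Dict String (PySem.Set String)) (ls : List String)
    (s : PySem.Set String) (h : s.Nodup) :
    (ls.foldl (fun s lang => s.union (bl.getD lang PySem.Set.empty)) s).Nodup := by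
  induction ls generalizing s with
  | nil => exact h
  | cons lang rest ih =>
    simp only [List.foldl_cons]
    exact ih _ (PySem.Set.nodup_union _ _ h)

-- ---- list.remove on a Nodup list ----
lemma remove?_of_mem_nodup (xs : List String) (v : String) (hv : v ∈ xs) (hnd : xs.Nodup) :
    PySem.List.remove? xs v = some (xs.filter (fun y => y ≠ v)) := by
  induction xs with
  | nil => cases hv
  | cons x rest ih =>
    obtain ⟨hnotin, hrest⟩ := List.nodup_cons.mp hnd
    by_cases hx : x = v
    · subst hx
      simp [PySem.List.remove?, List.idxOf?_cons]
      refine (List.filter_eq_self.mpr ?_).symm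
      intro y hy
      simp only [Bool.not_eq_true', decide_eq_false_iff_not]
      exact fun h => hnotin (h ▸ hy)
    · have hv' : v ∈ rest := by
        rcases List.mem_cons.mp hv with h | h
        · exact absurd h.symm hx
        · exact h
      have := ih hv' hrest
      simp only [PySem.List.remove?] at this ⊢
      rw [List.idxOf?_cons, if_neg (by simp [hx])]
      cases hidx : List.idxOf? v rest with
      | none => rw [hidx] at this; simp at this
      | some k =>
        rw [hidx] at this
        simp only [Option.map_some, Option.some.injEq] at this
        simp only [Option.map_some, Option.some.injEq, List.eraseIdx_cons_succ,
          List.filter_cons]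
        rw [this]
        simp [hx]

-- ---- proof-side names for the two folds ----
def stepAD (nd2 : PySem.Dict String (List String)) (res : PySem.Dict String (List String))
    (n : String) : PySem.Dict String (List String) :=
  match PySem.List.remove? (PySem.Set.ofList (nd2.getD n [])) n with
  | none => res
  | some l => if l ≠ [] then res.insert n (PySem.List.sorted l (fun x => x)) else res

def nd2D (countries : List (String × List String)) : PySem.Dict String (List String) :=
  (to_languages countries).values.foldl
    (fun d j => j.foldl (fun d k => d.modify k [] (fun v => v ++ j)) d)
    ((PySem.Dict.ofList countries).keys.foldl (fun d i => d.insert i []) PySem.Dict.empty)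

def blD (countries : List (String × List String)) : PySem.Dict String (PySem.Set String) :=
  (PySem.Dict.ofList countries).items.foldl (fun d p =>
    p.2.foldl (fun d lang => d.modify lang PySem.Set.empty (fun s => s.add p.1)) d)
    PySem.Dict.empty

def stepBD (bl : PySem.Dict String (PySem.Set String)) (res : PySem.Dict String (List String))
    (n : String) (ls : List String) : PySem.Dict String (List String) :=
  let partners : PySem.Set String :=
    ls.foldl (fun s lang => s.union (bl.getD lang PySem.Set.empty)) PySem.Set.empty
  let partners2 : PySem.Set String := partners.discard n
  if partners2 ≠ [] then res.insert n (PySem.List.sorted partners2 (fun x => x)) else res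

def groupD (countries : List (String × List String)) (m : String) : List String :=
  (PySem.Dict.ofList countries).keys.filter
    (fun k => ((PySem.Dict.ofList countries).getD k []).contains m)

-- ===== VERDICT (by name: the statement is the Claim_ definition above) =====
theorem lets_talk_spec : Claim_equal_lets_talk := by
  intro countries _hdom hpre
  unfold Spec_lets_talk
  unfold Pre_lets_talk at hpre
  have eA : lets_talk countries
      = ((nd2D countries).keys.foldl (fun res n => stepAD (nd2D countries) res n)
          PySem.Dict.empty).items := rfl
  have eB : lets_talk_alt countries
      = ((PySem.Dict.ofList countries).items.foldl
          (fun res p => stepBD (blD countries) res p.1 p.2) PySem.Dict.empty).items := rfl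
  have hnd : (PySem.Dict.ofList countries).keys.Nodup := PySem.Dict.nodup_keys_ofList countries
  have hnd0keys : ((PySem.Dict.ofList countries).keys.foldl (fun d i => d.insert i [])
      (PySem.Dict.empty : PySem.Dict String (List String))).keys
      = (PySem.Dict.ofList countries).keys := by
    rw [lt_init_keys, PySem.Dict.keys_empty]
    exact (PySem.Set.update_empty _).trans (PySem.Set.ofList_eq_self_of_nodup _ hnd)
  have htlnd := to_languages_nodup_keys countries
  have hval : (to_languages countries).values
      = (to_languages countries).keys.map (fun m => (to_languages countries).getD m []) :=
    PySem.Dict.values_eq_map_keys _ htlnd []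
  have hgschar : ∀ j ∈ (to_languages countries).values,
      ∃ m ∈ (to_languages countries).keys, j = groupD countries m := by
    intro j hj
    rw [hval] at hj
    obtain ⟨m, hm, hjm⟩ := List.mem_map.mp hj
    exact ⟨m, hm, by rw [← hjm, to_languages_getD countries m hm]; rfl⟩
  have hgs : ∀ j ∈ (to_languages countries).values, j.Nodup ∧ ∀ k ∈ j,
      k ∈ ((PySem.Dict.ofList countries).keys.foldl (fun d i => d.insert i [])
        (PySem.Dict.empty : PySem.Dict String (List String))).keys := by
    intro j hj
    obtain ⟨m, _, rfl⟩ := hgschar j hj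
    refine ⟨hnd.filter _, ?_⟩
    intro k hk
    rw [hnd0keys]
    exact (List.mem_filter.mp hk).1
  have hkeys2 : (nd2D countries).keys = (PySem.Dict.ofList countries).keys := by
    unfold nd2D
    rw [(outerB _ _ hgs).1, hnd0keys]
  have hAmem : ∀ n c, c ∈ (nd2D countries).getD n [] ↔
      ∃ m, m ∈ (PySem.Dict.ofList countries).getD n [] ∧
        m ∈ (PySem.Dict.ofList countries).getD c [] ∧
        c ∈ (PySem.Dict.ofList countries).keys ∧ n ∈ (PySem.Dict.ofList countries).keys := by
    intro n c
    unfold nd2D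
    rw [(outerB _ _ hgs).2 n c,
      lt_init_getD _ _ (fun m => PySem.Dict.getD_empty m []) n]
    simp only [List.not_mem_nil, false_or]
    constructor
    · rintro ⟨j, hj, hnj, hcj⟩
      obtain ⟨m, _, rfl⟩ := hgschar j hj
      obtain ⟨hnk, hnc⟩ := List.mem_filter.mp hnj
      obtain ⟨hck, hcc⟩ := List.mem_filter.mp hcj
      exact ⟨m, List.contains_iff_mem.mp hnc, List.contains_iff_mem.mp hcc, hck, hnk⟩
    · rintro ⟨m, hmn, hmc, hck, hnk⟩
      have hmtl : m ∈ (to_languages countries).keys := by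
        rw [to_languages_mem_keys]
        refine ⟨(PySem.Dict.ofList countries).getD n [], ?_, hmn⟩
        rw [PySem.Dict.values_eq_map_keys _ hnd []]
        exact List.mem_map.mpr ⟨n, hnk, rfl⟩
      refine ⟨groupD countries m, ?_, ?_, ?_⟩
      · rw [hval]
        exact List.mem_map.mpr ⟨m, hmtl, to_languages_getD countries m hmtl⟩
      · exact List.mem_filter.mpr ⟨hnk, List.contains_iff_mem.mpr hmn⟩
      · exact List.mem_filter.mpr ⟨hck, List.contains_iff_mem.mpr hmc⟩
  have hBL : ∀ m x, x ∈ (blD countries).getD m PySem.Set.empty ↔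
      x ∈ (PySem.Dict.ofList countries).keys ∧ m ∈ (PySem.Dict.ofList countries).getD x [] := by
    intro m x
    unfold blD
    rw [byLang_getD_mem]
    simp only [PySem.Dict.getD_empty, PySem.Set.empty, List.not_mem_nil, false_or]
    constructor
    · rintro ⟨p, hp, hm, rfl⟩
      have hp2 : (p.1, p.2) ∈ (PySem.Dict.ofList countries).items := by simpa using hp
      refine ⟨PySem.Dict.mem_keys_of_mem_items _ hp, ?_⟩
      rw [PySem.Dict.getD_of_mem_items _ hp2 hnd []]
      exact hm
    · rintro ⟨hx, hm⟩
      refine ⟨(x, (PySem.Dict.ofList countries).getD x []), ?_, hm, rfl⟩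
      rw [PySem.Dict.items_eq_map_keys _ hnd []]
      exact List.mem_map.mpr ⟨x, hx, rfl⟩
  have hBLnd : ∀ m, ((blD countries).getD m PySem.Set.empty).Nodup := by
    intro m
    unfold blD
    exact byLang_getD_nodup _ _ (fun m' => by simp [PySem.Dict.getD_empty]) m
  have hstep : ∀ res n, n ∈ (PySem.Dict.ofList countries).keys →
      stepAD (nd2D countries) res n
        = stepBD (blD countries) res n ((PySem.Dict.ofList countries).getD n []) := by
    intro res n hn
    set sA := PySem.Set.ofList ((nd2D countries).getD n []) with hsA
    have hndsA : sA.Nodup := PySem.Set.nodup_ofList _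
    have hmemsA : ∀ c, c ∈ sA ↔ ∃ m, m ∈ (PySem.Dict.ofList countries).getD n [] ∧
        m ∈ (PySem.Dict.ofList countries).getD c [] ∧
        c ∈ (PySem.Dict.ofList countries).keys := by
      intro c
      rw [hsA, PySem.Set.mem_ofList, hAmem n c]
      constructor
      · rintro ⟨m, a, b, c', _⟩; exact ⟨m, a, b, c'⟩
      · rintro ⟨m, a, b, c'⟩; exact ⟨m, a, b, c', hn⟩
    have hpn : (PySem.Dict.ofList countries).getD n [] ≠ [] := by
      refine hpre (n, (PySem.Dict.ofList countries).getD n []) ?_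
      rw [PySem.Dict.items_eq_map_keys _ hnd []]
      exact List.mem_map.mpr ⟨n, hn, rfl⟩
    obtain ⟨m0, hm0⟩ := List.exists_mem_of_ne_nil _ hpn
    have hnsA : n ∈ sA := (hmemsA n).mpr ⟨m0, hm0, hm0, hn⟩
    have hred : stepAD (nd2D countries) res n
        = if sA.filter (fun y => y ≠ n) ≠ []
          then res.insert n (PySem.List.sorted (sA.filter (fun y => y ≠ n)) (fun x => x))
          else res := by
      unfold stepAD
      rw [← hsA, remove?_of_mem_nodup sA n hnsA hndsA]
    have hPmem : ∀ c, c ∈ ((PySem.Dict.ofList countries).getD n []).foldl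
        (fun s lang => s.union ((blD countries).getD lang PySem.Set.empty)) PySem.Set.empty ↔
        ∃ m, m ∈ (PySem.Dict.ofList countries).getD n [] ∧
          m ∈ (PySem.Dict.ofList countries).getD c [] ∧
          c ∈ (PySem.Dict.ofList countries).keys := by
      intro c
      rw [partners_mem]
      simp only [PySem.Set.empty, List.not_mem_nil, false_or]
      constructor
      · rintro ⟨lang, hl, hc⟩
        obtain ⟨hck, hmc⟩ := (hBL lang c).mp hc
        exact ⟨lang, hl, hmc, hck⟩
      · rintro ⟨m, h1, h2, h3⟩
        exact ⟨m, h1, (hBL m c).mpr ⟨h3, h2⟩⟩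
    have hPnd : (((PySem.Dict.ofList countries).getD n []).foldl
        (fun s lang => s.union ((blD countries).getD lang PySem.Set.empty)) PySem.Set.empty).Nodup :=
      partners_nodup _ _ _ List.nodup_nil
    have hmeq : ∀ c, c ∈ sA.filter (fun y => y ≠ n) ↔
        c ∈ (((PySem.Dict.ofList countries).getD n []).foldl
          (fun s lang => s.union ((blD countries).getD lang PySem.Set.empty))
          PySem.Set.empty).discard n := by
      intro c
      rw [List.mem_filter, PySem.Set.mem_discard, hmemsA c, hPmem c]
      simp
    have hperm : (sA.filter (fun y => y ≠ n)).Perm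
        ((((PySem.Dict.ofList countries).getD n []).foldl
          (fun s lang => s.union ((blD countries).getD lang PySem.Set.empty))
          PySem.Set.empty).discard n) :=
      (List.perm_ext_iff_of_nodup (hndsA.filter _) (PySem.Set.nodup_discard _ _ hPnd)).mpr hmeq
    have hsort := PySem.List.sorted_eq_sorted_of_perm _ _ (fun x : String => x)
      (fun a b h => h) hperm
    rw [hred]
    simp only [stepBD]
    by_cases hE : (((PySem.Dict.ofList countries).getD n []).foldl
        (fun s lang => s.union ((blD countries).getD lang PySem.Set.empty))
        PySem.Set.empty).discard n = []
    · have hlA : sA.filter (fun y => y ≠ n) = [] := by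
        rw [hE] at hperm
        exact hperm.eq_nil
      rw [if_neg (not_not_intro hlA), if_neg (not_not_intro hE)]
    · have hlA : sA.filter (fun y => y ≠ n) ≠ [] := by
        intro h
        rw [h] at hperm
        exact hE hperm.symm.eq_nil
      rw [if_pos hlA, if_pos hE, hsort]
  rw [eA, eB, PySem.Dict.items_eq_map_keys _ hnd [], List.foldl_map, hkeys2]
  have hfun : (fun (res : PySem.Dict String (List String)) (k : String) =>
        stepBD (blD countries) res (k, (PySem.Dict.ofList countries).getD k []).1
          (k, (PySem.Dict.ofList countries).getD k []).2)
      = fun res k => stepBD (blD countries) res k ((PySem.Dict.ofList countries).getD k []) := rfl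
  rw [hfun]
  exact congrArg PySem.Dict.items
    (PySem.List.foldl_congr_mem _ _ _ _ (fun res x hx => hstep res x hx))

@[simp] theorem lets_talk_raises : Claim_raises_lets_talk := by
  unfold Claim_raises_lets_talk
  refine ⟨?_, by decide⟩
  rintro countries _ ⟨p, hp, h2⟩ hpre
  exact hpre p hp h2
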